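-- pv_equiv track=rewrite | github.com/Oleksii-Lasiichuk/UCU | 7/target_ua_naz.py | check_user_words
-- ===== SOURCE A (Python) =====
-- def check_user_words(user_words: list[str], language_part: str,\
-- letters: list[str], dict_of_words: list[tuple]) -> tuple[list]:
--     """
--     Checks for right and missed words
--     Args:
--         user_words (list[str]): words of user
--         language_part (str): part of language
--         letters (list[str]): letters
--         dict_of_words (list[tuple]): words which match
--     Returns:
--         tuple[list]: list of player right words and list of words he missed
--     """
--     player_win_lst = []
--     for i in user_words:
--         if i[0] in letters:
--             for k in dict_of_words:
--                 if i in k[0] and i not in player_win_lst: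
--                     player_win_lst.append(i)
--     skip_lst = []
--     for i in dict_of_words:
--         if i[0] not in player_win_lst and i[1] == language_part:
--             skip_lst.append(i[0])
--     return player_win_lst, skip_lst
-- ===== SOURCE B (Python) =====
-- def check_user_words(user_words: list[str], language_part: str,
--                      letters: list[str], dict_of_words: list[tuple]) -> tuple[list]:
--     """Substring-index algorithm: enumerate every substring of every dictionary
--     word ONCE into a hash set, so each user word is checked by a single set
--     lookup instead of a scan over the whole dictionary with per-pair substring
--     tests; the miss list then needs only O(1) membership tests."""
--     subs = {w[i:j] for w, _ in dict_of_words
--             for i in range(len(w)) for j in range(i + 1, len(w) + 1)}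
--     firsts = set(letters)
--     seen = set()
--     win = []
--     for u in user_words:
--         if u[0] in firsts and u in subs and u not in seen:
--             seen.add(u)
--             win.append(u)
--     skip = [w for w, part in dict_of_words if part == language_part and w not in seen]
--     return win, skip
-- ===== Notes on version B (the rewrite author's own statement) =====
-- stated objective: faster
-- what changed: B precomputes a hash set of ALL substrings of all dictionary words once, so A's inner per-user-word scan over the dictionary (substring tests plus list-membership re-checks) disappears: each user word becomes one set lookup, and the miss list uses O(1) set membership instead of an O(|win|) list scan per dictionary word.
import Mathlib
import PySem

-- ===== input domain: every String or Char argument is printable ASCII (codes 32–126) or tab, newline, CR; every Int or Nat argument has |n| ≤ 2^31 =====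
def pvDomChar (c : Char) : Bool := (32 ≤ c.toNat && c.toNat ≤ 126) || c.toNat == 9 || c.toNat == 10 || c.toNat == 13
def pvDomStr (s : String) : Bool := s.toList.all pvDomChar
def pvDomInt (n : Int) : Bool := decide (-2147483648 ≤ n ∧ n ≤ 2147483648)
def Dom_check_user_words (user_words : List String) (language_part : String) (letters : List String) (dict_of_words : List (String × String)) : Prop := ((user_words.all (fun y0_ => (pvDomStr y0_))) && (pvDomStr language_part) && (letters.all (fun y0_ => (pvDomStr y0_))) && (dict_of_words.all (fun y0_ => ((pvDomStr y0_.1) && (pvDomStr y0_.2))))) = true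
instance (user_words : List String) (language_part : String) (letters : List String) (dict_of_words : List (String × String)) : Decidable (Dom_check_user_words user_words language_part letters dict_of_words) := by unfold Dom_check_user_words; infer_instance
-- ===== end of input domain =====

-- B replaces A's inner dictionary scan by a precomputed hash set of all substrings
-- of the dictionary words (one set lookup per user word); alternative algorithm.

-- ===== PORT A =====
def check_user_words (user_words : List String) (language_part : String) (letters : List String) (dict_of_words : List (String × String)) : List String × List String :=
  let player_win_lst := user_words.foldl (fun acc i =>
    match PySem.Str.pyGet? i 0 with
    | some c =>
      if letters.contains (String.mk [c]) then
        dict_of_words.foldl (fun acc2 k =>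
          if PySem.Str.isIn i k.1 && !(acc2.contains i) then acc2 ++ [i] else acc2) acc
      else acc
    | none => acc) []  -- none = IndexError on i[0]; excluded by Pre_
  let skip_lst := dict_of_words.foldl (fun acc i =>
    if !(player_win_lst.contains i.1) && i.2 == language_part then acc ++ [i.1] else acc) []
  (player_win_lst, skip_lst)

-- ===== PORT B =====
def check_user_words_alt (user_words : List String) (language_part : String) (letters : List String) (dict_of_words : List (String × String)) : List String × List String :=
  -- subs = {w[i:j] for w,_ in dict_of_words for i in range(len(w)) for j in range(i+1, len(w)+1)}
  let subs : PySem.Set String := dict_of_words.foldl (fun s d =>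
    (PySem.List.pyRange 0 (PySem.Str.len d.1) 1).foldl (fun s i =>
      (PySem.List.pyRange (i + 1) ((PySem.Str.len d.1) + 1) 1).foldl (fun s j =>
        PySem.Set.add s (PySem.Str.slice d.1 (some i) (some j))) s) s) PySem.Set.empty
  let firsts : PySem.Set String := PySem.Set.ofList letters
  let st := user_words.foldl (fun (st : List String × PySem.Set String) u =>
    match PySem.Str.pyGet? u 0 with
    | some c =>
      if PySem.Set.contains firsts (String.mk [c]) && PySem.Set.contains subs u &&
         !(PySem.Set.contains st.2 u)
      then (st.1 ++ [u], PySem.Set.add st.2 u) else st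
    | none => st) ([], PySem.Set.empty)  -- none = IndexError on u[0]; excluded by Pre_
  let skip := dict_of_words.filterMap (fun d =>
    if d.2 == language_part && !(PySem.Set.contains st.2 d.1) then some d.1 else none)
  (st.1, skip)

-- ===== PRECONDITION & SPEC =====
-- Pre_ excludes user word lists containing an empty string, on which A raises IndexError at i[0].
def Pre_check_user_words (user_words : List String) (language_part : String) (letters : List String) (dict_of_words : List (String × String)) : Prop :=
  ∀ w ∈ user_words, w ≠ ""
instance (user_words : List String) (language_part : String) (letters : List String) (dict_of_words : List (String × String)) : Decidable (Pre_check_user_words user_words language_part letters dict_of_words) := by unfold Pre_check_user_words; infer_instance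
def pvWitness_check_user_words : List String × String × List String × (List (String × String)) :=
  (["ab", "c"], "n", ["a"], [("abc", "n"), ("d", "n")])
def Spec_check_user_words (user_words : List String) (language_part : String) (letters : List String) (dict_of_words : List (String × String)) (out : List String × List String) : Prop := out = check_user_words_alt user_words language_part letters dict_of_words
instance (user_words : List String) (language_part : String) (letters : List String) (dict_of_words : List (String × String)) (out : List String × List String) : Decidable (Spec_check_user_words user_words language_part letters dict_of_words out) := by unfold Spec_check_user_words; infer_instance

-- ===== CLAIM (what is proved, stated in full; the proofs are below) =====
def Claim_equal_check_user_words : Prop := ∀ (user_words : List String) (language_part : String) (letters : List String) (dict_of_words : List (String × String)), Dom_check_user_words user_words language_part letters dict_of_words → Pre_check_user_words user_words language_part letters dict_of_words → Spec_check_user_words user_words language_part letters dict_of_words (check_user_words user_words language_part letters dict_of_words)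

-- ===== LEMMAS AND PROOFS =====

-- Generic: membership in a foldl whose step adds (per hg) exactly the elements with P · i.
theorem mem_foldl_step {ι α : Type} (g : List α → ι → List α) (P : α → ι → Prop)
    (hg : ∀ s i x, x ∈ g s i ↔ x ∈ s ∨ P x i) :
    ∀ (l : List ι) (s : List α) (x : α), x ∈ l.foldl g s ↔ x ∈ s ∨ ∃ i ∈ l, P x i := by
  intro l
  induction l with
  | nil => simp
  | cons i rest ih =>
    intro s x
    rw [List.foldl_cons, ih, hg]
    simp only [List.mem_cons]
    constructor
    · rintro ((h | h) | ⟨i', hi', h⟩)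
      · exact Or.inl h
      · exact Or.inr ⟨i, Or.inl rfl, h⟩
      · exact Or.inr ⟨i', Or.inr hi', h⟩
    · rintro (h | ⟨i', (rfl | hi'), h⟩)
      · exact Or.inl (Or.inl h)
      · exact Or.inl (Or.inr h)
      · exact Or.inr ⟨i', hi', h⟩

-- The substring-index set contains exactly the slices d.1[i:j] (i<j within bounds).
theorem mem_subs (dict_of_words : List (String × String)) (x : String) :
    x ∈ dict_of_words.foldl (fun s d =>
      (PySem.List.pyRange 0 (PySem.Str.len d.1) 1).foldl (fun s i =>
        (PySem.List.pyRange (i + 1) ((PySem.Str.len d.1) + 1) 1).foldl (fun s j =>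
          PySem.Set.add s (PySem.Str.slice d.1 (some i) (some j))) s) s) PySem.Set.empty
    ↔ ∃ d ∈ dict_of_words, ∃ i : Int, (0 ≤ i ∧ i < ((PySem.Str.len d.1) : Int)) ∧
        ∃ j : Int, (i + 1 ≤ j ∧ j < ((PySem.Str.len d.1) : Int) + 1) ∧
          x = PySem.Str.slice d.1 (some i) (some j) := by
  rw [mem_foldl_step _ (fun x d => ∃ i : Int, (0 ≤ i ∧ i < PySem.Str.len d.1) ∧
        ∃ j : Int, (i + 1 ≤ j ∧ j < PySem.Str.len d.1 + 1) ∧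
          x = PySem.Str.slice d.1 (some i) (some j))]
  · simp [PySem.Set.empty]
  · intro s d x
    rw [mem_foldl_step _ (fun x i => ∃ j : Int, (i + 1 ≤ j ∧ j < PySem.Str.len d.1 + 1) ∧
          x = PySem.Str.slice d.1 (some i) (some j))]
    · simp only [PySem.List.mem_pyRange_one]
    · intro s i x
      rw [mem_foldl_step _ (fun x j => x = PySem.Str.slice d.1 (some i) (some j))]
      · simp only [PySem.List.mem_pyRange_one]
      · intro s j x
        rw [PySem.Set.mem_add]

-- A nonempty list is a slice l[i:j] (0≤i<len, i<j≤len) iff it is an infix of l.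
theorem slice_iff_infix (w l : List Char) (hw : w ≠ []) :
    (∃ i : Int, (0 ≤ i ∧ i < (l.length : Int)) ∧
      ∃ j : Int, (i + 1 ≤ j ∧ j < (l.length : Int) + 1) ∧
        w = PySem.List.slice l (some i) (some j)) ↔ w <:+: l := by
  constructor
  · rintro ⟨i, ⟨hi0, hil⟩, j, ⟨hij, hjl⟩, hw'⟩
    rw [PySem.List.slice_toNat l hi0 (by omega)] at hw'
    exact ⟨l.take i.toNat, (l.drop i.toNat).drop (j.toNat - i.toNat), by
      rw [hw']
      rw [List.append_assoc, List.take_append_drop, List.take_append_drop]⟩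
  · rintro ⟨s, t, hst⟩
    refine ⟨(s.length : Int), ⟨by positivity, ?_⟩,
      ((s.length + w.length : Nat) : Int), ⟨?_, ?_⟩, ?_⟩
    · subst hst
      have : 0 < w.length := List.length_pos_of_ne_nil hw
      simp only [List.length_append]
      push_cast
      omega
    · have : 0 < w.length := List.length_pos_of_ne_nil hw
      push_cast
      omega
    · subst hst
      simp only [List.length_append]
      push_cast
      omega
    · subst hst
      rw [PySem.List.slice_natCast, Nat.add_sub_cancel_left, List.append_assoc,
        List.drop_left, List.take_left']
      rfl

-- Set membership of the index equals A's "substring of some dictionary word" test.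
theorem contains_subs_eq (dict_of_words : List (String × String)) (u : String)
    (hu : u.toList ≠ []) :
    PySem.Set.contains (dict_of_words.foldl (fun s d =>
      (PySem.List.pyRange 0 (PySem.Str.len d.1) 1).foldl (fun s i =>
        (PySem.List.pyRange (i + 1) ((PySem.Str.len d.1) + 1) 1).foldl (fun s j =>
          PySem.Set.add s (PySem.Str.slice d.1 (some i) (some j))) s) s) PySem.Set.empty) u
    = dict_of_words.any (fun d => PySem.Str.isIn u d.1) := by
  rw [Bool.eq_iff_iff, PySem.Set.contains_iff, mem_subs, List.any_eq_true]
  apply exists_congr; intro d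
  apply and_congr_right; intro _
  rw [PySem.Str.isIn_iff_infix, ← slice_iff_infix u.toList d.1.toList hu]
  apply exists_congr; intro i
  apply and_congr; · rw [PySem.Str.len_eq]
  apply exists_congr; intro j
  apply and_congr; · rw [PySem.Str.len_eq]
  rw [← String.toList_inj, PySem.Str.toList_slice, PySem.Chars.slice_eq_listSlice]

-- A's inner dict scan appends i at most once: it equals one conditional append.
theorem innerA_eq (dict_of_words : List (String × String)) (i : String) (acc : List String) :
    dict_of_words.foldl (fun acc2 k =>
      if PySem.Str.isIn i k.1 && !(acc2.contains i) then acc2 ++ [i] else acc2) acc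
    = if !(acc.contains i) && dict_of_words.any (fun d => PySem.Str.isIn i d.1)
      then acc ++ [i] else acc := by
  induction dict_of_words generalizing acc with
  | nil => simp
  | cons k rest ih =>
    rw [List.foldl_cons, ih]
    split_ifs with h1 h2 h3 h4 h5 h6 h7 h8 <;>
      simp only [List.any_cons, Bool.and_eq_true, Bool.or_eq_true, Bool.not_eq_eq_eq_not,
        Bool.not_true, List.contains_eq_mem, decide_eq_false_iff_not, decide_eq_true_eq,
        List.mem_append, List.mem_singleton, not_or, or_true, true_or, decide_true] at * <;>
      tauto

-- The main-loop invariant: B's state is (A's list, a set with the same membership),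
-- for ANY set 'subs' whose membership agrees with A's dictionary-scan test.
theorem mainloop_eq (user_words : List String) (letters : List String)
    (dict_of_words : List (String × String)) (subs : PySem.Set String)
    (hsubs : ∀ u : String, u.toList ≠ [] →
      PySem.Set.contains subs u = dict_of_words.any (fun d => PySem.Str.isIn u d.1))
    (l : List String) (s : PySem.Set String)
    (hs : ∀ x, s.contains x = l.contains x) :
    (user_words.foldl (fun (st : List String × PySem.Set String) u =>
      match PySem.Str.pyGet? u 0 with
      | some c =>
        if PySem.Set.contains (PySem.Set.ofList letters) (String.mk [c]) &&
           PySem.Set.contains subs u && !(PySem.Set.contains st.2 u)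
        then (st.1 ++ [u], PySem.Set.add st.2 u) else st
      | none => st) (l, s)).1
    = user_words.foldl (fun acc i =>
      match PySem.Str.pyGet? i 0 with
      | some c =>
        if letters.contains (String.mk [c]) then
          dict_of_words.foldl (fun acc2 k =>
            if PySem.Str.isIn i k.1 && !(acc2.contains i) then acc2 ++ [i] else acc2) acc
        else acc
      | none => acc) l ∧
    ∀ x, ((user_words.foldl (fun (st : List String × PySem.Set String) u =>
      match PySem.Str.pyGet? u 0 with
      | some c =>
        if PySem.Set.contains (PySem.Set.ofList letters) (String.mk [c]) &&
           PySem.Set.contains subs u && !(PySem.Set.contains st.2 u)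
        then (st.1 ++ [u], PySem.Set.add st.2 u) else st
      | none => st) (l, s)).2).contains x
    = ((user_words.foldl (fun acc i =>
      match PySem.Str.pyGet? i 0 with
      | some c =>
        if letters.contains (String.mk [c]) then
          dict_of_words.foldl (fun acc2 k =>
            if PySem.Str.isIn i k.1 && !(acc2.contains i) then acc2 ++ [i] else acc2) acc
        else acc
      | none => acc) l).contains x) := by
  induction user_words generalizing l s with
  | nil => exact ⟨rfl, fun x => hs x⟩
  | cons w rest ih =>
    simp only [List.foldl_cons]
    cases hg : PySem.Str.pyGet? w 0 with
    | none => exact ih l s hs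
    | some c =>
      have hwne : w.toList ≠ [] := by
        intro h
        rw [show (0 : Int) = ((0 : Nat) : Int) from rfl, PySem.Str.pyGet?_natCast, h] at hg
        simp at hg
      have hletter : PySem.Set.contains (PySem.Set.ofList letters) (String.mk [c])
          = letters.contains (String.mk [c]) := by simp
      have hany := hsubs w hwne
      rw [innerA_eq]
      by_cases hl : letters.contains (String.mk [c])
      · by_cases hc : l.contains w
        · have hsw : s.contains w = true := by rw [hs]; exact hc
          simp only [hletter, hl, hc, hsw, hany]
          by_cases hA : dict_of_words.any (fun d => PySem.Str.isIn w d.1) <;>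
            simpa [hA] using ih l s hs
        · have hsw : s.contains w = false := by rw [hs]; simpa using hc
          by_cases hA : dict_of_words.any (fun d => PySem.Str.isIn w d.1)
          · simp only [hletter, hl, hc, hsw, hany, hA]
            simp only [Bool.not_false, Bool.and_true, Bool.true_and, if_true,
              Bool.not_eq_true] at *
            exact ih (l ++ [w]) (PySem.Set.add s w)
              (fun x => by
                have hx := hs x
                have hsw' : w ∉ s := by simpa using hsw
                have hadd : PySem.Set.add s w = s ++ [w] := by
                  simp [PySem.Set.add, hsw']
                rw [hadd]
                simp only [PySem.Set.contains_eq_listContains, List.contains_eq_mem,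
                  List.mem_append, List.mem_singleton] at hx ⊢
                rw [decide_eq_decide] at hx ⊢
                tauto)
          · simp only [hletter, hl, hc, hsw, hany, hA]
            simpa using ih l s hs
      · simp only [hletter, hl]
        simpa [hl] using ih l s hs

theorem skip_eq (dict_of_words : List (String × String)) (language_part : String)
    (win : List String) (s : PySem.Set String)
    (hs : ∀ x, s.contains x = win.contains x) :
    dict_of_words.foldl (fun acc i =>
      if !(win.contains i.1) && i.2 == language_part then acc ++ [i.1] else acc) []
    = dict_of_words.filterMap (fun d =>
      if d.2 == language_part && !(PySem.Set.contains s d.1) then some d.1 else none) := by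
  have : ∀ (acc : List String),
      dict_of_words.foldl (fun acc i =>
        if !(win.contains i.1) && i.2 == language_part then acc ++ [i.1] else acc) acc
      = acc ++ dict_of_words.filterMap (fun d =>
        if d.2 == language_part && !(PySem.Set.contains s d.1) then some d.1 else none) := by
    induction dict_of_words with
    | nil => simp
    | cons d rest ih =>
      intro acc
      rw [List.foldl_cons, List.filterMap_cons, ih]
      have hw : d.1 ∈ s ↔ d.1 ∈ win := by
        have h := hs d.1
        simp only [PySem.Set.contains_eq_listContains, List.contains_eq_mem] at h
        exact decide_eq_decide.mp h
      by_cases h1 : d.1 ∈ win <;> by_cases h2 : d.2 = language_part <;>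
        simp [h1, h2, hw, List.contains_eq_mem]
  simpa using this []

-- ===== VERDICT (by name: the statement is the Claim_ definition above) =====
theorem check_user_words_spec : Claim_equal_check_user_words := by
  intro user_words language_part letters dict_of_words _ _
  unfold Spec_check_user_words check_user_words check_user_words_alt
  obtain ⟨h1, h2⟩ := mainloop_eq user_words letters dict_of_words _
    (fun u hu => contains_subs_eq dict_of_words u hu) [] PySem.Set.empty
    (fun x => by simp [PySem.Set.empty])
  simp only [Prod.mk.injEq]
  exact ⟨h1.symm, skip_eq dict_of_words language_part _ _ h2⟩
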